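-- pv_equiv track=rewrite | github.com/ipipan/spacy-pl-trf | morf_interface.py | dedotify
-- ===== SOURCE A (Python) =====
-- from itertools import product
--
-- def dedotify(tag):
--     # this is for handling the packed notation for tags (which uses dots)
--     elements = tag.split(":")
--     dimensions = []
--     for el in elements:
--         dimensions.append(el.split("."))
--     combinations = product(*dimensions)
--     possible_tags = [":".join(combination) for combination in combinations]
--     return possible_tags
-- ===== SOURCE B (Python) =====
-- def dedotify(tag):
--     fields = tag.split(":")
--     results = fields[0].split(".")
--     for field in fields[1:]:
--         results = [r + ":" + o for r in results for o in field.split(".")]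
--     return results
-- ===== Notes on version B (the rewrite author's own statement) =====
-- stated objective: simpler
-- what changed: Replaces itertools.product over all split dimensions plus a separate join pass with a single left-to-right fold that extends the running list of partial tag strings field by field, fusing enumeration and joining.
import Mathlib
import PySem

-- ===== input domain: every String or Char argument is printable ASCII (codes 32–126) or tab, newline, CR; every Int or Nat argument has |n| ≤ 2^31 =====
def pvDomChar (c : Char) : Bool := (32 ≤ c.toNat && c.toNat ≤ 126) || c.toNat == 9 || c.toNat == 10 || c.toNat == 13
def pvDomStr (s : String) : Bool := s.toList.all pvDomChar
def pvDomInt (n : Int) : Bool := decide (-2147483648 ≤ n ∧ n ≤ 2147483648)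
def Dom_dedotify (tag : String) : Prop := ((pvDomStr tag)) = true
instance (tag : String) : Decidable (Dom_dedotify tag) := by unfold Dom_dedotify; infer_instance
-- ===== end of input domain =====

-- B replaces itertools.product + a join pass by one fold that extends partial tag strings
-- field by field (objective: simpler, same cost).

-- ===== PORT A =====
-- shared helper: Python s.split(sep) for a non-empty sep (exact: PySem.Chars.splitOn is the sep ≠ "" form)
def pySplit (s sep : String) : List String :=
  (PySem.Chars.splitOn s.toList sep.toList).map String.ofList

-- itertools.product(*dims): tuples in lexicographic order, last dimension varying fastest
def pyProduct (dims : List (List String)) : List (List String) :=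
  match dims with
  | [] => [[]]
  | d :: rest => d.flatMap (fun x => (pyProduct rest).map (fun c => x :: c))

def dedotify (tag : String) : List String :=
  let elements := pySplit tag ":"
  let dimensions := elements.foldl (fun acc el => acc ++ [pySplit el "."]) ([] : List (List String))
  let combinations := pyProduct dimensions
  combinations.map (fun c => PySem.Str.join ":" c)

-- ===== PORT B =====
-- fields[0] / fields[1:]: split(":") never returns an empty list, so the [] arm is unreachable
def dedotify_alt (tag : String) : List String :=
  match pySplit tag ":" with
  | [] => []
  | f0 :: rest =>
      rest.foldl
        (fun results field =>
          results.flatMap (fun r => (pySplit field ".").map (fun o => r ++ ":" ++ o)))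
        (pySplit f0 ".")

-- ===== PRECONDITION & SPEC =====
def Spec_dedotify (tag : String) (out : List String) : Prop := out = dedotify_alt tag
instance (tag : String) (out : List String) : Decidable (Spec_dedotify tag out) := by unfold Spec_dedotify; infer_instance

-- ===== CLAIM (what is proved, stated in full; the proofs are below) =====
def Claim_equal_dedotify : Prop := ∀ (tag : String), Dom_dedotify tag → Spec_dedotify tag (dedotify tag)

-- ===== LEMMAS AND PROOFS =====

-- splitOn never returns the empty list
theorem splitOn_go_ne_nil (sep : List Char) (fuel : Nat) (l cur : List Char)
    (acc : List (List Char)) : PySem.Chars.splitOn.go sep fuel l cur acc ≠ [] := by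
  induction fuel generalizing l cur acc with
  | zero => simp [PySem.Chars.splitOn.go]
  | succ n ih =>
    cases l with
    | nil => simp [PySem.Chars.splitOn.go]
    | cons c rest =>
      rw [PySem.Chars.splitOn.go]
      split
      · exact ih _ _ _
      · exact ih _ _ _

theorem pySplit_ne_nil (s sep : String) : pySplit s sep ≠ [] := by
  unfold pySplit PySem.Chars.splitOn
  intro h
  exact splitOn_go_ne_nil _ _ _ _ _ (List.map_eq_nil_iff.mp h)

-- accumulate-append fold builds the map
theorem foldl_append_singleton (f : String → List String) (l : List String)
    (acc : List (List String)) :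
    l.foldl (fun acc el => acc ++ [f el]) acc = acc ++ l.map f := by
  induction l generalizing acc with
  | nil => simp
  | cons x xs ih => simp [ih]

-- the tail part of ":".join(x :: c)
def joinTail : List String → String
  | [] => ""
  | x :: c => ":" ++ x ++ joinTail c

theorem join_cons_eq (x : String) (c : List String) :
    PySem.Str.join ":" (x :: c) = x ++ joinTail c := by
  induction c generalizing x with
  | nil =>
    simp [PySem.Str.join, PySem.Chars.join_singleton, joinTail]
  | cons y ys ih =>
    have h := PySem.Chars.join_cons_cons (":" : String).toList x.toList y.toList (ys.map String.toList)
    simp only [PySem.Str.join, List.map_cons] at *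
    rw [h, joinTail]
    have : String.ofList (x.toList ++ (":" : String).toList ++
        PySem.Chars.join (":" : String).toList (y.toList :: ys.map String.toList))
        = x ++ ":" ++ String.ofList (PySem.Chars.join (":" : String).toList (y.toList :: ys.map String.toList)) := by
      apply String.ext
      simp
    rw [this, ih y, String.append_assoc, String.append_assoc]

-- main loop invariant: the fold over remaining fields is A's product, joined, relative to acc
theorem foldl_eq_product (fields : List String) (acc : List String) :
    fields.foldl
      (fun results field =>
        results.flatMap (fun r => (pySplit field ".").map (fun o => r ++ ":" ++ o)))
      acc
    = acc.flatMap (fun r =>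
        (pyProduct (fields.map (fun f => pySplit f "."))).map (fun c => r ++ joinTail c)) := by
  induction fields generalizing acc with
  | nil => simp [pyProduct, joinTail]
  | cons f fs ih =>
    simp only [List.foldl_cons, List.map_cons, pyProduct]
    rw [ih]
    simp [List.flatMap_assoc, List.flatMap_map, List.map_flatMap, List.map_map,
      Function.comp_def, joinTail, String.append_assoc]

-- ===== VERDICT (by name: the statement is the Claim_ definition above) =====
theorem dedotify_spec : Claim_equal_dedotify := by
  intro tag _
  unfold Spec_dedotify dedotify dedotify_alt
  cases h : pySplit tag ":" with
  | nil => exact absurd h (pySplit_ne_nil tag ":")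
  | cons e0 rest =>
    simp only [foldl_append_singleton, List.nil_append, List.map_cons, pyProduct,
      foldl_eq_product, List.map_flatMap, List.map_map]
    simp [Function.comp_def, join_cons_eq]
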